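-- pv_equiv track=rewrite | github.com/kxlsx/sudoku-solver | sudokumod.py | squareNum
-- ===== SOURCE A (Python) =====
-- def squareNum(rowI, elementI, boardLen):
--
--     squareSize = int(boardLen / 3)
--     squareMaxYs = tuple(filter(lambda x: x % 3 == 0, range(3, boardLen + 1)))
--     squareMaxXs = tuple(filter(lambda x: x % squareSize == 0, range(squareSize, boardLen + 1)))
--
--     base = 0
--     for maxY in squareMaxYs:
--
--         if rowI < maxY:
--
--             mod = 0
--             for maxX in squareMaxXs:
--
--                 if elementI < maxX:
--                     return base + mod
--
--                 mod += squareSize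
--
--         base+=1
-- ===== SOURCE B (Python) =====
-- def squareNum(rowI, elementI, boardLen):
--     """Sub-square index of a board cell in O(1); None for positions off the board."""
--     squareSize = boardLen // 3
--     if 0 <= rowI < boardLen and 0 <= elementI < boardLen:
--         return rowI // 3 + elementI // squareSize * squareSize
--     return None
-- ===== Notes on version B (the rewrite author's own statement) =====
-- stated objective: faster
-- what changed: A builds the lists of sub-square boundary multiples and scans them with two nested loops; B bounds-checks the cell against the board and computes the sub-square index directly with O(1) floor-division arithmetic.
-- intended difference: Where A's scanned grid (rows below 3*(boardLen//3), columns below (boardLen//(boardLen//3))*(boardLen//3), negatives clamped to square 0) disagrees with the board rectangle: A clamps negative indices to square 0 and returns None for in-board cells past the truncated grid on boards not a multiple of 3, while B returns None for any index off the board and a square index for every in-board cell, which is the intended reading of a cell index. — e.g. on squareNum(-1, 0, 9): A returns some 0, B returns none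
import Mathlib
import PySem

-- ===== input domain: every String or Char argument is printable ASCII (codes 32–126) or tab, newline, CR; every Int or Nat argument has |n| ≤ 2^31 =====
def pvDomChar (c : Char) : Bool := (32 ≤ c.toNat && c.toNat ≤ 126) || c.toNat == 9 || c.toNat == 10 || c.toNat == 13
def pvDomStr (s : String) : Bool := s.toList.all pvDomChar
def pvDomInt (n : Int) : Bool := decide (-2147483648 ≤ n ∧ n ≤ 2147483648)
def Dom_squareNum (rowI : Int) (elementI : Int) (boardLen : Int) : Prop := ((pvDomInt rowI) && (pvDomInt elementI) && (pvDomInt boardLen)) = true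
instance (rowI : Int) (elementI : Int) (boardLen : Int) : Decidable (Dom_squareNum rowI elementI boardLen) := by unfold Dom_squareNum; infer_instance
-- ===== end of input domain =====

-- B replaces A's boundary-list scans by a bounds check and O(1) floor-division arithmetic; A = B proved on Pre_ outside D_ (negative indices, which A clamps, and the leftover strip of boards not a multiple of 3, where A returns None), with A ≠ B everywhere inside D_.


-- ===== PORT A =====
-- inner 'for maxX in squareMaxXs' loop: returns base+mod at the first maxX with elementI < maxX
def pvInnerA (elementI squareSize base mod : Int) : List Int → Option Int
  | [] => none
  | maxX :: rest =>
      if elementI < maxX then some (base + mod)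
      else pvInnerA elementI squareSize base (mod + squareSize) rest

-- outer 'for maxY in squareMaxYs' loop with its base counter (base += 1 also when the inner loop falls through)
def pvOuterA (rowI elementI squareSize : Int) (xs : List Int) (base : Int) : List Int → Option Int
  | [] => none
  | maxY :: rest =>
      if rowI < maxY then
        match pvInnerA elementI squareSize base 0 xs with
        | some v => some v
        | none => pvOuterA rowI elementI squareSize xs (base + 1) rest
      else pvOuterA rowI elementI squareSize xs (base + 1) rest

def squareNum (rowI : Int) (elementI : Int) (boardLen : Int) : Option Int :=
  -- int(boardLen / 3): PySem.Int.truncdiv is exact for |boardLen| ≤ 2^31 < 2^53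
  let squareSize := PySem.Int.truncdiv boardLen 3
  let squareMaxYs := (PySem.List.pyRange 3 (boardLen + 1) 1).filter (fun x => PySem.Int.mod x 3 == 0)
  -- 'x % squareSize' raises ZeroDivisionError when squareSize = 0 (boardLen ∈ {0,1,2}): excluded by Pre_
  let squareMaxXs := (PySem.List.pyRange squareSize (boardLen + 1) 1).filter (fun x => PySem.Int.mod x squareSize == 0)
  pvOuterA rowI elementI squareSize squareMaxXs 0 squareMaxYs

-- ===== PORT B =====
def squareNum_alt (rowI : Int) (elementI : Int) (boardLen : Int) : Option Int :=
  let squareSize := PySem.Int.floordiv boardLen 3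
  if 0 ≤ rowI ∧ rowI < boardLen ∧ 0 ≤ elementI ∧ elementI < boardLen then
    some (PySem.Int.floordiv rowI 3 + PySem.Int.floordiv elementI squareSize * squareSize)
  else none

-- ===== PRECONDITION & SPEC =====
-- Pre_ excludes exactly boardLen ∈ {0,1,2}, where A raises ZeroDivisionError ('x % squareSize' with squareSize = 0).
def Pre_squareNum (rowI : Int) (elementI : Int) (boardLen : Int) : Prop := boardLen < 0 ∨ 3 ≤ boardLen
instance (rowI : Int) (elementI : Int) (boardLen : Int) : Decidable (Pre_squareNum rowI elementI boardLen) := by unfold Pre_squareNum; infer_instance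
def pvWitness_squareNum : Int × Int × Int := (4, 7, 9)

-- Where A's scanned grid (rows < 3*(boardLen//3), columns < (boardLen//squareSize)*squareSize, negatives clamped into square 0)
-- disagrees with the board rectangle: A clamps negative indices to square 0 and returns None on in-board cells past the truncated
-- grid of boards not a multiple of 3; B returns None for any off-board index and a square index for every in-board cell,
-- which is the intended reading of a cell index.
def D_squareNum (rowI : Int) (elementI : Int) (boardLen : Int) : Prop :=
  3 ≤ boardLen ∧
  (((rowI < PySem.Int.floordiv boardLen 3 * 3 ∧
     elementI < PySem.Int.floordiv boardLen (PySem.Int.floordiv boardLen 3) * PySem.Int.floordiv boardLen 3) ∧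
    (rowI < 0 ∨ elementI < 0)) ∨
   (0 ≤ rowI ∧ rowI < boardLen ∧ 0 ≤ elementI ∧ elementI < boardLen ∧
    (PySem.Int.floordiv boardLen 3 * 3 ≤ rowI ∨
     PySem.Int.floordiv boardLen (PySem.Int.floordiv boardLen 3) * PySem.Int.floordiv boardLen 3 ≤ elementI)))
instance (rowI : Int) (elementI : Int) (boardLen : Int) : Decidable (D_squareNum rowI elementI boardLen) := by unfold D_squareNum; infer_instance

def Spec_squareNum (rowI : Int) (elementI : Int) (boardLen : Int) (out : Option Int) : Prop := ¬ D_squareNum rowI elementI boardLen → out = squareNum_alt rowI elementI boardLen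
instance (rowI : Int) (elementI : Int) (boardLen : Int) (out : Option Int) : Decidable (Spec_squareNum rowI elementI boardLen out) := by unfold Spec_squareNum; infer_instance

def pvDiffWitness_squareNum : Int × Int × Int := (-1, 0, 9)
def pvDiffWitnessOut_squareNum : (Option Int) × (Option Int) := (some 0, none)

-- ===== CLAIM (what is proved, stated in full; the proofs are below) =====
def Claim_unchanged_squareNum : Prop := ∀ (rowI : Int) (elementI : Int) (boardLen : Int), Dom_squareNum rowI elementI boardLen → Pre_squareNum rowI elementI boardLen → Spec_squareNum rowI elementI boardLen (squareNum rowI elementI boardLen)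
def Claim_changed_squareNum : Prop := Dom_squareNum (pvDiffWitness_squareNum.1) (pvDiffWitness_squareNum.2.1) (pvDiffWitness_squareNum.2.2) ∧ Pre_squareNum (pvDiffWitness_squareNum.1) (pvDiffWitness_squareNum.2.1) (pvDiffWitness_squareNum.2.2) ∧ D_squareNum (pvDiffWitness_squareNum.1) (pvDiffWitness_squareNum.2.1) (pvDiffWitness_squareNum.2.2) ∧ squareNum (pvDiffWitness_squareNum.1) (pvDiffWitness_squareNum.2.1) (pvDiffWitness_squareNum.2.2) = pvDiffWitnessOut_squareNum.1 ∧ squareNum_alt (pvDiffWitness_squareNum.1) (pvDiffWitness_squareNum.2.1) (pvDiffWitness_squareNum.2.2) = pvDiffWitnessOut_squareNum.2 ∧ pvDiffWitnessOut_squareNum.1 ≠ pvDiffWitnessOut_squareNum.2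
def Claim_exact_squareNum : Prop := ∀ (rowI : Int) (elementI : Int) (boardLen : Int), Dom_squareNum rowI elementI boardLen → Pre_squareNum rowI elementI boardLen → D_squareNum rowI elementI boardLen → squareNum rowI elementI boardLen ≠ squareNum_alt rowI elementI boardLen

-- ===== LEMMAS AND PROOFS =====

-- the list [(j+1)*s, (j+2)*s, …, (j+k)*s]
def pvMults (s : Int) (j k : Nat) : List Int := (List.range k).map (fun t : Nat => ((j + t + 1 : Nat) : Int) * s)

theorem pvMults_succ (s : Int) (j k : Nat) :
    pvMults s j (k + 1) = ((j : Int) + 1) * s :: pvMults s (j + 1) k := by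
  unfold pvMults
  rw [List.range_succ_eq_map, List.map_cons, List.map_map, List.cons_eq_cons]
  refine ⟨by push_cast; ring, ?_⟩
  refine List.map_congr_left fun t _ => ?_
  simp only [Function.comp_apply, Nat.succ_eq_add_one]
  push_cast; ring

-- Nat form: the multiples of m among 0,…,n-1 are 0, m, 2m, … (⌈n/m⌉ of them)
theorem pvFilterRangeMod (m : Nat) (hm : 0 < m) (n : Nat) :
    (List.range n).filter (fun i => i % m == 0) = (List.range ((n + m - 1) / m)).map (· * m) := by
  induction n with
  | zero =>
      rw [show (0 + m - 1) / m = 0 from Nat.div_eq_of_lt (by omega)]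
      rfl
  | succ n ih =>
      rw [List.range_succ, List.filter_append, ih]
      have hdm := Nat.div_add_mod n m
      by_cases h : n % m = 0
      · have hn : n / m * m = n := Nat.div_mul_cancel (Nat.dvd_of_mod_eq_zero h)
        have e1 : (n + m - 1) / m = n / m := by
          rw [show n + m - 1 = (m - 1) + m * (n / m) from by omega,
              Nat.add_mul_div_left _ _ hm, Nat.div_eq_of_lt (by omega)]
          omega
        have e2 : (n + 1 + m - 1) / m = n / m + 1 := by
          rw [show n + 1 + m - 1 = m + m * (n / m) from by omega,
              Nat.add_mul_div_left _ _ hm, Nat.div_self hm]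
          omega
        rw [e1, e2, show List.filter (fun i => i % m == 0) [n] = [n] from by simp [List.filter, h],
            List.range_succ, List.map_append]
        simp [hn]
      · have hrm : n % m < m := Nat.mod_lt _ hm
        have e1 : (n + m - 1) / m = n / m + 1 := by
          rw [show n + m - 1 = ((n % m - 1) + m * (n / m)) + m from by omega,
              Nat.add_div_right _ hm, Nat.add_mul_div_left _ _ hm,
              Nat.div_eq_of_lt (by omega)]
          omega
        have e2 : (n + 1 + m - 1) / m = n / m + 1 := by
          rw [show n + 1 + m - 1 = (n % m + m * (n / m)) + m from by omega,
              Nat.add_div_right _ hm, Nat.add_mul_div_left _ _ hm,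
              Nat.div_eq_of_lt (Nat.mod_lt _ hm)]
          omega
        rw [e1, e2, show List.filter (fun i => i % m == 0) [n] = [] from by
              have hb : (n % m == 0) = false := by simpa using h
              simp [List.filter_singleton, hb]]
        simp

-- the Python filter over range(s, b+1) of the multiples of s, for 0 < s ≤ b
theorem pvFilterChar (s b : Int) (hs : 0 < s) (hsb : s ≤ b) :
    (PySem.List.pyRange s (b + 1) 1).filter (fun x => PySem.Int.mod x s == 0)
      = pvMults s 0 ((PySem.Int.floordiv b s).toNat) := by
  obtain ⟨sn, rfl⟩ : ∃ sn : Nat, s = (sn : Int) := ⟨s.toNat, (Int.toNat_of_nonneg hs.le).symm⟩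
  obtain ⟨bn, rfl⟩ : ∃ bn : Nat, b = (bn : Int) := ⟨b.toNat, (Int.toNat_of_nonneg (by omega)).symm⟩
  have hsn : 0 < sn := by exact_mod_cast hs
  have hsbn : sn ≤ bn := by exact_mod_cast hsb
  rw [PySem.List.pyRange_one,
      show ((bn : Int) + 1 - (sn : Int)).toNat = bn + 1 - sn from by omega, List.filter_map]
  simp only [Function.comp_def]
  have hcong : ∀ i ∈ List.range (bn + 1 - sn),
      (PySem.Int.mod ((sn : Int) + (i : Int)) (sn : Int) == 0) = (i % sn == 0) := by
    intro i _
    have h1 : PySem.Int.mod ((sn : Int) + (i : Int)) (sn : Int) = ((i % sn : Nat) : Int) := by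
      rw [PySem.Int.mod_eq_emod_of_pos hs, Int.add_comm]
      have h2 : ((i : Int) + (sn : Int) * 1) % (sn : Int) = (i : Int) % (sn : Int) :=
        Int.add_mul_emod_self_left _ _ _
      rw [mul_one] at h2
      rw [h2]
      push_cast
      rfl
    rw [h1, Bool.eq_iff_iff]
    simp [Int.natCast_dvd_natCast, Nat.dvd_iff_mod_eq_zero]
  rw [List.filter_congr hcong, pvFilterRangeMod sn hsn, List.map_map,
      show bn + 1 - sn + sn - 1 = bn from by omega,
      show (PySem.Int.floordiv (bn : Int) (sn : Int)).toNat = bn / sn from by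
        rw [PySem.Int.floordiv_natCast]; exact Int.toNat_natCast _]
  unfold pvMults
  refine List.map_congr_left fun t _ => ?_
  simp only [Function.comp_def]
  push_cast
  ring

theorem pvInnerChar (e s base : Int) (hs : 0 < s) :
    ∀ (k j : Nat),
      pvInnerA e s base ((j : Int) * s) (pvMults s j k)
        = if max (j : Int) (PySem.Int.floordiv e s) < (j : Int) + (k : Int) then
            some (base + s * max (j : Int) (PySem.Int.floordiv e s))
          else none := by
  intro k
  induction k with
  | zero =>
      intro j
      simp only [pvMults, List.range_zero, List.map_nil, pvInnerA]
      rw [if_neg (by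
        have h := le_max_left (j : Int) (PySem.Int.floordiv e s)
        push_cast
        omega)]
  | succ k ih =>
      intro j
      rw [pvMults_succ]
      simp only [pvInnerA]
      by_cases he : e < ((j : Int) + 1) * s
      · have hd : PySem.Int.floordiv e s < (j : Int) + 1 :=
          (PySem.Int.floordiv_lt_iff_lt_mul hs).mpr he
        have hmax : max (j : Int) (PySem.Int.floordiv e s) = (j : Int) := max_eq_left (by omega)
        rw [if_pos he, hmax, if_pos (by push_cast; omega)]
        congr 1
        ring
      · have hd : (j : Int) + 1 ≤ PySem.Int.floordiv e s :=
          (PySem.Int.le_floordiv_iff_mul_le hs).mpr (not_lt.mp he)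
        rw [if_neg he, show (j : Int) * s + s = (((j + 1 : Nat)) : Int) * s from by push_cast; ring,
            ih (j + 1)]
        rw [max_eq_right (by push_cast; omega), max_eq_right (by omega),
            show (((j + 1 : Nat)) : Int) + (k : Int) = (j : Int) + ((k + 1 : Nat) : Int) from by
              push_cast; ring]

theorem pvOuterNone (r e s : Int) (xs : List Int)
    (h : ∀ c : Int, pvInnerA e s c 0 xs = none) :
    ∀ (ys : List Int) (base : Int), pvOuterA r e s xs base ys = none := by
  intro ys
  induction ys with
  | nil => intro base; rfl
  | cons y ys ih =>
      intro base
      simp only [pvOuterA, h base]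
      split <;> exact ih _

theorem pvOuterChar (r e s : Int) (xs : List Int) (v : Int)
    (h : ∀ c : Int, pvInnerA e s c 0 xs = some (c + v)) :
    ∀ (m j : Nat),
      pvOuterA r e s xs (j : Int) (pvMults 3 j m)
        = if max (j : Int) (PySem.Int.floordiv r 3) < (j : Int) + (m : Int) then
            some (max (j : Int) (PySem.Int.floordiv r 3) + v)
          else none := by
  intro m
  induction m with
  | zero =>
      intro j
      simp only [pvMults, List.range_zero, List.map_nil, pvOuterA]
      rw [if_neg (by
        have hj := le_max_left (j : Int) (PySem.Int.floordiv r 3)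
        push_cast
        omega)]
  | succ m ih =>
      intro j
      rw [pvMults_succ]
      simp only [pvOuterA]
      by_cases hr : r < ((j : Int) + 1) * 3
      · have hd : PySem.Int.floordiv r 3 < (j : Int) + 1 :=
          (PySem.Int.floordiv_lt_iff_lt_mul (by norm_num)).mpr hr
        have hmax : max (j : Int) (PySem.Int.floordiv r 3) = (j : Int) := max_eq_left (by omega)
        rw [if_pos hr, h (j : Int), hmax, if_pos (by push_cast; omega)]
      · have hd : (j : Int) + 1 ≤ PySem.Int.floordiv r 3 :=
          (PySem.Int.le_floordiv_iff_mul_le (by norm_num)).mpr (not_lt.mp hr)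
        rw [if_neg hr, show (j : Int) + 1 = (((j + 1 : Nat)) : Int) from by push_cast; ring,
            ih (j + 1)]
        rw [max_eq_right (by push_cast; omega), max_eq_right (by omega),
            show (((j + 1 : Nat)) : Int) + (m : Int) = (j : Int) + ((m + 1 : Nat) : Int) from by
              push_cast; ring]

theorem pvMaxDiv (r s : Int) (hs : 0 < s) :
    PySem.Int.floordiv (max r 0) s = max 0 (PySem.Int.floordiv r s) := by
  by_cases h : 0 ≤ r
  · rw [max_eq_left h, max_eq_right]
    exact (PySem.Int.le_floordiv_iff_mul_le hs).mpr (by rw [zero_mul]; exact h)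
  · rw [max_eq_right (by omega : r ≤ 0), max_eq_left]
    · rw [PySem.Int.floordiv_eq_ediv_of_pos hs]
      simp
    · have h1 : PySem.Int.floordiv r s < 1 :=
        (PySem.Int.floordiv_lt_iff_lt_mul hs).mpr (by omega)
      omega

-- closed form of A on boards of length ≥ 3: A scans the grid rows < 3s, columns < (b//s)*s, with negatives clamped
theorem pvAChar (r e b : Int) (hb : 3 ≤ b) :
    squareNum r e b
      = if r < PySem.Int.floordiv b 3 * 3 ∧
           e < PySem.Int.floordiv b (PySem.Int.floordiv b 3) * PySem.Int.floordiv b 3 then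
          some (PySem.Int.floordiv (max r 0) 3
                + PySem.Int.floordiv b 3 * PySem.Int.floordiv (max e 0) (PySem.Int.floordiv b 3))
        else none := by
  simp only [squareNum]
  have h3 : (0 : Int) < 3 := by norm_num
  have hsf : PySem.Int.truncdiv b 3 = PySem.Int.floordiv b 3 := by
    obtain ⟨bn, rfl⟩ : ∃ bn : Nat, b = (bn : Int) := ⟨b.toNat, (Int.toNat_of_nonneg (by omega)).symm⟩
    have h1 : PySem.Int.truncdiv (bn : Int) 3 = ((bn / 3 : Nat) : Int) := rfl
    rw [h1, show ((3 : Int)) = ((3 : Nat) : Int) from rfl, PySem.Int.floordiv_natCast]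
  rw [hsf]
  have hq31 : 1 ≤ PySem.Int.floordiv b 3 :=
    (PySem.Int.le_floordiv_iff_mul_le h3).mpr (by omega)
  have hq3b : PySem.Int.floordiv b 3 ≤ b := by
    have := (PySem.Int.floordiv_lt_iff_lt_mul (a := b) (q := b + 1) h3).mpr (by omega)
    omega
  set q3 := PySem.Int.floordiv b 3 with hq3
  have hq3pos : (0 : Int) < q3 := by omega
  rw [pvFilterChar 3 b h3 hb, pvFilterChar q3 b hq3pos hq3b]
  set m := (PySem.Int.floordiv b 3).toNat with hmdef
  set k := (PySem.Int.floordiv b q3).toNat with hkdef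
  have hmI : (m : Int) = q3 := by rw [hmdef, ← hq3]; exact Int.toNat_of_nonneg (by omega)
  have hK0 : 0 ≤ PySem.Int.floordiv b q3 :=
    (PySem.Int.le_floordiv_iff_mul_le hq3pos).mpr (by rw [zero_mul]; omega)
  have hkI : (k : Int) = PySem.Int.floordiv b q3 := Int.toNat_of_nonneg hK0
  have hk1 : 1 ≤ (k : Int) := by
    rw [hkI]
    exact (PySem.Int.le_floordiv_iff_mul_le hq3pos).mpr (by rw [one_mul]; omega)
  have hinner : ∀ c : Int, pvInnerA e q3 c 0 (pvMults q3 0 k)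
      = if max 0 (PySem.Int.floordiv e q3) < (k : Int) then
          some (c + q3 * max 0 (PySem.Int.floordiv e q3))
        else none := by
    intro c
    have h0 := pvInnerChar e q3 c hq3pos k 0
    simpa using h0
  have hecol : (max 0 (PySem.Int.floordiv e q3) < (k : Int)) ↔ e < PySem.Int.floordiv b q3 * q3 := by
    rw [← hkI]
    constructor
    · intro h
      have h8 : PySem.Int.floordiv e q3 < (k : Int) := by
        rcases max_cases 0 (PySem.Int.floordiv e q3) with ⟨hc, _⟩ | ⟨hc, _⟩ <;> omega
      exact (PySem.Int.floordiv_lt_iff_lt_mul hq3pos).mp h8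
    · intro h
      have h8 : PySem.Int.floordiv e q3 < (k : Int) :=
        (PySem.Int.floordiv_lt_iff_lt_mul hq3pos).mpr h
      omega
  by_cases hin : max 0 (PySem.Int.floordiv e q3) < (k : Int)
  · have hsome : ∀ c : Int, pvInnerA e q3 c 0 (pvMults q3 0 k)
        = some (c + q3 * max 0 (PySem.Int.floordiv e q3)) := fun c => by
      rw [hinner c, if_pos hin]
    have houter := pvOuterChar r e q3 (pvMults q3 0 k) _ hsome m 0
    simp only [Nat.cast_zero, zero_add] at houter
    rw [houter, hmI]
    have hrrow : (max 0 (PySem.Int.floordiv r 3) < q3) ↔ r < q3 * 3 := by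
      constructor
      · intro h
        have h8 : PySem.Int.floordiv r 3 < q3 := by
          rcases max_cases 0 (PySem.Int.floordiv r 3) with ⟨hc, _⟩ | ⟨hc, _⟩ <;> omega
        exact (PySem.Int.floordiv_lt_iff_lt_mul h3).mp h8
      · intro h
        have h8 : PySem.Int.floordiv r 3 < q3 :=
          (PySem.Int.floordiv_lt_iff_lt_mul h3).mpr h
        omega
    by_cases hr2 : r < q3 * 3
    · rw [if_pos (hrrow.mpr hr2), if_pos ⟨hr2, hecol.mp hin⟩,
          pvMaxDiv r 3 h3, pvMaxDiv e q3 hq3pos]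
    · rw [if_neg (fun h => hr2 (hrrow.mp h)), if_neg (fun h => hr2 h.1)]
  · have hnone : ∀ c : Int, pvInnerA e q3 c 0 (pvMults q3 0 k) = none := fun c => by
      rw [hinner c, if_neg hin]
    rw [pvOuterNone r e q3 _ hnone (pvMults 3 0 m) 0,
        if_neg (fun h => hin (hecol.mpr h.2))]

-- A on negative board lengths: both boundary lists are empty, the loops never run
theorem pvANegNone (r e b : Int) (hb : b < 0) : squareNum r e b = none := by
  simp only [squareNum]
  rw [PySem.List.pyRange_one_eq_nil (show b + 1 ≤ (3 : Int) by omega)]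
  rfl

-- common arithmetic facts about the truncated grid of a board of length ≥ 3
theorem pvGridLe (b : Int) (hb : 3 ≤ b) :
    1 ≤ PySem.Int.floordiv b 3 ∧ PySem.Int.floordiv b 3 * 3 ≤ b ∧
    PySem.Int.floordiv b (PySem.Int.floordiv b 3) * PySem.Int.floordiv b 3 ≤ b := by
  have h3 : (0 : Int) < 3 := by norm_num
  have hq31 : 1 ≤ PySem.Int.floordiv b 3 :=
    (PySem.Int.le_floordiv_iff_mul_le h3).mpr (by omega)
  have hq3pos : (0 : Int) < PySem.Int.floordiv b 3 := by omega
  refine ⟨hq31, (PySem.Int.le_floordiv_iff_mul_le h3).mp le_rfl, ?_⟩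
  exact (PySem.Int.le_floordiv_iff_mul_le hq3pos).mp le_rfl

-- B's branch value equals A's clamped value on nonnegative in-grid cells
theorem pvValsEq (r e s : Int) (hr : 0 ≤ r) (he : 0 ≤ e) :
    PySem.Int.floordiv r 3 + PySem.Int.floordiv e s * s
      = PySem.Int.floordiv (max r 0) 3 + s * PySem.Int.floordiv (max e 0) s := by
  rw [max_eq_left hr, max_eq_left he, mul_comm]

-- ===== VERDICT (by name: the statement is the Claim_ definition above) =====
theorem squareNum_spec : Claim_unchanged_squareNum := by
  intro r e b _ hPre hnD
  unfold Pre_squareNum at hPre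
  unfold D_squareNum at hnD
  unfold squareNum_alt
  rcases hPre with hb | hb
  · rw [pvANegNone r e b hb, if_neg (by omega)]
  · obtain ⟨hq31, h3s, hks⟩ := pvGridLe b hb
    rw [pvAChar r e b hb]
    by_cases hin : r < PySem.Int.floordiv b 3 * 3 ∧
        e < PySem.Int.floordiv b (PySem.Int.floordiv b 3) * PySem.Int.floordiv b 3
    · have hpos : 0 ≤ r ∧ 0 ≤ e := by
        by_contra hneg
        exact hnD ⟨hb, Or.inl ⟨hin, by omega⟩⟩
      rw [if_pos hin, if_pos ⟨hpos.1, by omega, hpos.2, by omega⟩,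
          pvValsEq r e (PySem.Int.floordiv b 3) hpos.1 hpos.2]
    · rw [if_neg hin, if_neg (fun hB => ?_)]
      obtain ⟨hr0, hrb, he0, heb⟩ := hB
      exact hnD ⟨hb, Or.inr ⟨hr0, hrb, he0, heb, by omega⟩⟩

theorem squareNum_changed : Claim_changed_squareNum := by
  unfold Claim_changed_squareNum; decide

theorem squareNum_tight : Claim_exact_squareNum := by
  intro r e b _ hPre hD
  unfold D_squareNum at hD
  obtain ⟨hb, hD⟩ := hD
  obtain ⟨hq31, h3s, hks⟩ := pvGridLe b hb
  rw [pvAChar r e b hb]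
  unfold squareNum_alt
  rcases hD with ⟨hin, hneg⟩ | ⟨hr0, hrb, he0, heb, hout⟩
  · rw [if_pos hin, if_neg (by omega)]
    simp
  · rw [if_neg (by omega), if_pos ⟨hr0, hrb, he0, heb⟩]
    simp
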